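-- pv_equiv track=rewrite | github.com/tsuru7/algorithm-study | AtCoder/VirtulaContest/MAYOCON/20220907/B.py | solve
-- ===== SOURCE A (Python) =====
-- from collections import Counter
--
-- def solve(n,sList):
--     counter = Counter(sList)
--     ans = []
--     _, m = counter.most_common(1)[0]
--     for k, v in counter.most_common():
--         if v == m:
--             ans.append(k)
--     return sorted(ans)
-- ===== SOURCE B (Python) =====
-- def solve(n, sList):
--     prev = None
--     run = 0
--     best = 0
--     ans = []
--     for x in sorted(sList):
--         run = run + 1 if x == prev else 1
--         prev = x
--         if best < run:
--             best = run
--             ans = [x]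
--         elif run == best:
--             ans.append(x)
--     return ans
-- ===== Notes on version B (the rewrite author's own statement) =====
-- stated objective: alternative
-- what changed: Replaces Counter/most_common with sorting the input once and a single pass over the sorted list that tracks the current run length, the best run and the answer; runs appear in sorted order so no Counter and no final sort are needed.
import Mathlib
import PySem

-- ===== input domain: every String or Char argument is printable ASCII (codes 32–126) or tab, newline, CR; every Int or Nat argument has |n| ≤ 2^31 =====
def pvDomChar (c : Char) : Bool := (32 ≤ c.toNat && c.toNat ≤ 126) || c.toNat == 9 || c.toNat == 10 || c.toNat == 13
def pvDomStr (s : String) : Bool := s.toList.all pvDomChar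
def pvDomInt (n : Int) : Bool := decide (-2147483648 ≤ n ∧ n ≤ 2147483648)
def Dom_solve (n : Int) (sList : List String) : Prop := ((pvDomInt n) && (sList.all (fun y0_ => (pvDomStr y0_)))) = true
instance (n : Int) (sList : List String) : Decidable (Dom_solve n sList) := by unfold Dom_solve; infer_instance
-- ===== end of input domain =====

-- B replaces Counter/most_common with sort-once + a single run-tracking pass (alternative algorithm, similar cost).


-- ===== PORT A =====
def solve (n : Int) (sList : List String) : List String :=
  let counter := PySem.Dict.counter sList
  let mc := PySem.List.sorted counter.items (fun kv => kv.2) true  -- counter.most_common()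
  match PySem.List.pyGet? mc 0 with                                 -- most_common(1)[0]: IndexError on empty
  | none => []
  | some km =>
    let m := km.2
    let ans := mc.foldl (fun ans kv => if kv.2 == m then ans ++ [kv.1] else ans) []
    PySem.List.sorted ans (fun x => x)

-- ===== PORT B =====
-- one iteration of Source B's for-loop; state = (prev, run, best, ans)
def bStep (st : Option String × Int × Int × List String) (x : String) :
    Option String × Int × Int × List String :=
  let run := if some x == st.1 then st.2.1 + 1 else 1
  if st.2.2.1 < run then (some x, run, run, [x])
  else if run == st.2.2.1 then (some x, run, st.2.2.1, st.2.2.2 ++ [x])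
  else (some x, run, st.2.2.1, st.2.2.2)

def solve_alt (n : Int) (sList : List String) : List String :=
  ((PySem.List.sorted sList (fun x => x)).foldl bStep (none, 0, 0, [])).2.2.2

-- ===== PRECONDITION & SPEC =====
-- Pre_ excludes only the empty list, on which A raises IndexError (most_common(1)[0] of an empty Counter).
def Pre_solve (n : Int) (sList : List String) : Prop := sList ≠ []
instance (n : Int) (sList : List String) : Decidable (Pre_solve n sList) := by unfold Pre_solve; infer_instance
def pvWitness_solve : Int × List String := (3, ["b", "a", "a", "c", "b"])

def Spec_solve (n : Int) (sList : List String) (out : List String) : Prop := out = solve_alt n sList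
instance (n : Int) (sList : List String) (out : List String) : Decidable (Spec_solve n sList out) := by unfold Spec_solve; infer_instance

-- ===== CLAIM (what is proved, stated in full; the proofs are below) =====
def Claim_equal_solve : Prop := ∀ (n : Int) (sList : List String), Dom_solve n sList → Pre_solve n sList → Spec_solve n sList (solve n sList)

-- ===== LEMMAS AND PROOFS =====

-- proof-side spec: the distinct run heads of a list, in order
def grp (l : List String) : List String :=
  match l with
  | [] => []
  | x :: rest => x :: grp (rest.dropWhile (fun y => y == x))
termination_by l.length
decreasing_by
  simp only [List.length_cons]
  exact Nat.lt_succ_of_le (List.Sublist.length_le (List.dropWhile_sublist _))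

-- proof-side spec: the maximum multiplicity in l (0 for [])
def mcnt (l : List String) : Int := ((grp l).map (fun k => (l.count k : Int))).foldr max 0

lemma run_split {x : String} {rest : List String} (h : (x :: rest).Pairwise (· ≤ ·)) :
    rest.takeWhile (fun y => y == x) = List.replicate (rest.count x) x ∧
    ∀ y ∈ rest.dropWhile (fun y => y == x), x < y := by
  induction rest with
  | nil => simp
  | cons y r ih =>
    rcases List.pairwise_cons.mp h with ⟨hx, hr⟩
    by_cases hyx : y = x
    · subst hyx
      have h' : (y :: r).Pairwise (· ≤ ·) := h.of_cons
      rcases ih (List.pairwise_cons.mpr ⟨fun z hz => (List.pairwise_cons.mp h').1 z hz, h'.of_cons⟩) with ⟨h1, h2⟩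
      constructor
      · simp [List.takeWhile_cons, List.count_cons, h1, List.replicate_succ]
      · simpa [List.dropWhile_cons] using h2
    · have hxy : x < y := lt_of_le_of_ne (hx y (by simp)) (fun e => hyx e.symm)
      have hcnt : r.count x = 0 := by
        rw [List.count_eq_zero]
        intro hxr
        exact absurd ((List.pairwise_cons.mp h.of_cons).1 x hxr) (not_le.mpr hxy)
      constructor
      · simp [List.takeWhile_cons, hyx, List.count_cons, hcnt, Ne.symm hyx]
      · intro z hz
        rw [List.dropWhile_cons] at hz
        simp only [show (y == x) = false by simp [hyx], Bool.false_eq_true, if_false] at hz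
        rcases List.mem_cons.mp hz with rfl | hzr
        · exact hxy
        · exact lt_of_lt_of_le hxy ((List.pairwise_cons.mp h.of_cons).1 z hzr)

lemma tail_pairwise {x : String} {rest : List String} (h : (x :: rest).Pairwise (· ≤ ·)) :
    (rest.dropWhile (fun y => y == x)).Pairwise (· ≤ ·) :=
  (List.Pairwise.sublist (List.dropWhile_sublist _) (List.Pairwise.of_cons h))

lemma count_tail {x : String} {rest : List String} (h : (x :: rest).Pairwise (· ≤ ·)) {k : String}
    (hk : k ∈ (rest.dropWhile (fun y => y == x))) :
    (rest.dropWhile (fun y => y == x)).count k = (x :: rest).count k := by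
  rcases run_split h with ⟨h1, h2⟩
  have hkx : x < k := h2 k hk
  have hkne : k ≠ x := fun e => absurd hkx (by simp [e])
  have hsplit : rest = rest.takeWhile (fun y => y == x) ++ rest.dropWhile (fun y => y == x) :=
    (List.takeWhile_append_dropWhile).symm
  calc (rest.dropWhile (fun y => y == x)).count k
      = (rest.takeWhile (fun y => y == x)).count k + (rest.dropWhile (fun y => y == x)).count k := by
        rw [h1, List.count_replicate]
        split_ifs with he
        · exact absurd (beq_iff_eq.mp he).symm hkne
        · simp
    _ = rest.count k := by rw [← List.count_append, ← hsplit]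
    _ = (x :: rest).count k := by simp [List.count_cons, Ne.symm hkne, hkne]

lemma mem_grp {l : List String} (h : l.Pairwise (· ≤ ·)) (k : String) : k ∈ grp l ↔ k ∈ l := by
  induction l using grp.induct with
  | case1 => simp [grp]
  | case2 x rest ih =>
    rw [grp]
    have htail := ih (tail_pairwise h)
    constructor
    · intro hm
      rcases List.mem_cons.mp hm with rfl | hm
      · simp
      · exact List.mem_cons_of_mem _ (List.dropWhile_sublist _ |>.mem (htail.mp hm))
    · intro hm
      rcases List.mem_cons.mp hm with rfl | hm
      · simp
      · by_cases hkx : k = x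
        · simp [hkx]
        · right
          apply htail.mpr
          have hsplit : rest = rest.takeWhile (fun y => y == x) ++ rest.dropWhile (fun y => y == x) :=
            (List.takeWhile_append_dropWhile).symm
          rw [hsplit] at hm
          rcases List.mem_append.mp hm with hm | hm
          · exfalso; rw [(run_split h).1] at hm; exact hkx (List.eq_of_mem_replicate hm)
          · exact hm

lemma grp_pairwise_lt {l : List String} (h : l.Pairwise (· ≤ ·)) : (grp l).Pairwise (· < ·) := by
  induction l using grp.induct with
  | case1 => simp [grp]
  | case2 x rest ih =>
    rw [grp]
    refine List.pairwise_cons.mpr ⟨?_, ih (tail_pairwise h)⟩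
    intro k hk
    exact (run_split h).2 k ((mem_grp (tail_pairwise h) k).mp hk)

lemma le_foldr_max_int {a : Int} {L : List Int} (h : a ∈ L) : a ≤ L.foldr max 0 := by
  induction L with
  | nil => simp at h
  | cons b L ih =>
    rcases List.mem_cons.mp h with rfl | h
    · exact le_max_left _ _
    · exact le_trans (ih h) (le_max_right _ _)

lemma foldr_max_nonneg (L : List Int) : 0 ≤ L.foldr max 0 := by
  induction L with
  | nil => simp
  | cons b L ih => exact le_trans ih (le_max_right _ _)

lemma foldr_max_mem {L : List Int} (hne : L ≠ []) (hpos : ∀ a ∈ L, 1 ≤ a) : L.foldr max 0 ∈ L := by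
  induction L with
  | nil => simp at hne
  | cons b L ih =>
    rcases eq_or_ne L [] with rfl | hL
    · simp [max_eq_left (by linarith [hpos b (by simp)] : (0:Int) ≤ b)]
    · rcases le_total b (L.foldr max 0) with hb | hb
      · simp only [List.foldr_cons, max_eq_right hb]
        exact List.mem_cons_of_mem _ (ih hL (fun a ha => hpos a (List.mem_cons_of_mem _ ha)))
      · simp [max_eq_left hb]

lemma mcnt_nonneg (l : List String) : 0 ≤ mcnt l := foldr_max_nonneg _

lemma le_mcnt {l : List String} {k : String} (hk : k ∈ grp l) : (l.count k : Int) ≤ mcnt l :=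
  le_foldr_max_int (List.mem_map_of_mem hk)

lemma mcnt_attained {l : List String} (h : l.Pairwise (· ≤ ·)) (hne : l ≠ []) :
    ∃ k ∈ grp l, mcnt l = (l.count k : Int) := by
  have hg : grp l ≠ [] := by
    cases l with
    | nil => exact absurd rfl hne
    | cons x rest => rw [grp]; simp
  have hm : mcnt l ∈ (grp l).map (fun k => (l.count k : Int)) := by
    apply foldr_max_mem (by simpa using hg)
    intro a ha
    rcases List.mem_map.mp ha with ⟨k, hk, rfl⟩
    have : 0 < l.count k := List.count_pos_iff.mpr ((mem_grp h k).mp hk)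
    omega
  rcases List.mem_map.mp hm with ⟨k, hk, he⟩
  exact ⟨k, hk, he.symm⟩

lemma mcnt_cons {x : String} {rest : List String} (h : (x :: rest).Pairwise (· ≤ ·)) :
    mcnt (x :: rest) = max ((x :: rest).count x : Int) (mcnt (rest.dropWhile (fun y => y == x))) := by
  unfold mcnt
  conv_lhs => rw [grp]
  rw [List.map_cons, List.foldr_cons]
  congr 1
  refine congrArg (List.foldr max 0) (List.map_congr_left ?_)
  intro k hk
  have := count_tail h ((mem_grp (tail_pairwise h) k).mp hk)
  omega

lemma run_cont (c : Nat) (x : String) (r best : Int) (ans : List String)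
    (hr : 1 ≤ r) (hrb : r ≤ best) :
    (List.replicate c x).foldl bStep (some x, r, best, ans) =
      (some x, r + c, max best (r + c),
        if best < r + c then [x] else if r + c = best ∧ r ≠ best then ans ++ [x] else ans) := by
  induction c generalizing r best ans with
  | zero =>
    simp only [List.replicate_zero, List.foldl_nil, Nat.cast_zero, add_zero]
    rw [max_eq_left hrb, if_neg (by omega), if_neg (by omega)]
  | succ c ih =>
    rw [List.replicate_succ, List.foldl_cons]
    have hstep : bStep (some x, r, best, ans) x =
        if best < r + 1 then (some x, r + 1, r + 1, [x])
        else if r + 1 == best then (some x, r + 1, best, ans ++ [x])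
        else (some x, r + 1, best, ans) := by
      simp [bStep]
    rw [hstep]
    by_cases h1 : best < r + 1
    · -- r = best
      have hrbeq : r = best := by omega
      rw [if_pos h1, ih (r + 1) (r + 1) [x] (by omega) le_rfl]
      simp only [Prod.mk.injEq]
      refine ⟨trivial, by push_cast; ring, by push_cast; omega, ?_⟩
      split_ifs <;> push_cast at * <;> first | rfl | omega | (exfalso; omega)
    · rw [if_neg h1]
      by_cases h2 : r + 1 = best
      · rw [if_pos (by simpa using h2), ih (r + 1) best (ans ++ [x]) (by omega) (by omega)]
        simp only [Prod.mk.injEq]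
        refine ⟨trivial, by push_cast; ring, by push_cast; omega, ?_⟩
        split_ifs <;> push_cast at * <;> first | rfl | omega | (exfalso; omega)
      · rw [if_neg (by simpa using h2), ih (r + 1) best ans (by omega) (by omega)]
        simp only [Prod.mk.injEq]
        refine ⟨trivial, by push_cast; ring, by push_cast; omega, ?_⟩
        split_ifs <;> push_cast at * <;> first | rfl | omega | (exfalso; omega)

lemma run_start (c : Nat) (x : String) (prev : Option String) (r best : Int) (ans : List String)
    (hb : 0 ≤ best) (hprev : prev ≠ some x) :
    (List.replicate (c + 1) x).foldl bStep (prev, r, best, ans) =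
      (some x, (1 + c : Int), max best (1 + (c : Int)),
        if best < 1 + (c : Int) then [x] else if 1 + (c : Int) = best then ans ++ [x] else ans) := by
  rw [List.replicate_succ, List.foldl_cons]
  have hstep : bStep (prev, r, best, ans) x =
      if best < 1 then (some x, 1, 1, [x])
      else if (1 : Int) == best then (some x, 1, best, ans ++ [x])
      else (some x, 1, best, ans) := by
    simp [bStep, show (some x == prev) = false by simpa using (fun e => hprev e.symm)]
  rw [hstep]
  by_cases h1 : best < 1
  · rw [if_pos h1, run_cont c x 1 1 [x] le_rfl le_rfl]
    have h0 : best = 0 := by omega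
    subst h0
    rw [max_eq_right (by omega : (1:Int) ≤ 1 + (c:Int)), max_eq_right (by omega : (0:Int) ≤ 1 + (c:Int)), if_pos (by omega : (0:Int) < 1 + (c:Int))]
    split_ifs <;> first | rfl | simp_all | (exfalso; omega)
  · rw [if_neg h1]
    by_cases h2 : (1 : Int) = best
    · rw [if_pos (by simpa using h2), run_cont c x 1 best (ans ++ [x]) le_rfl (by omega)]
      simp only [Prod.mk.injEq, true_and]
      split_ifs <;> first | (exact ⟨rfl, rfl⟩) | simp_all | (exfalso; omega)
    · rw [if_neg (by simpa using h2), run_cont c x 1 best ans le_rfl (by omega)]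
      simp only [Prod.mk.injEq, true_and]
      split_ifs <;> first | (exact ⟨rfl, rfl⟩) | simp_all | (exfalso; omega)

lemma scan_spec (l : List String) (h : l.Pairwise (· ≤ ·)) (prev : Option String)
    (r best : Int) (ans : List String) (hb : 0 ≤ best)
    (hprev : ∀ y ∈ l, prev ≠ some y) :
    (l.foldl bStep (prev, r, best, ans)).2.2.2 =
      (if mcnt l ≤ best then ans else []) ++
        (grp l).filter (fun k => (l.count k : Int) == max best (mcnt l)) := by
  induction l using grp.induct generalizing prev r best ans with
  | case1 =>
    simp [mcnt, grp, hb]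
  | case2 x rest ih =>
    have hts : rest.takeWhile (fun y => y == x) = List.replicate (rest.count x) x := (run_split h).1
    have hdecomp : x :: rest = List.replicate (rest.count x + 1) x ++ rest.dropWhile (fun y => y == x) := by
      rw [List.replicate_succ, List.cons_append]
      congr 1
      rw [← hts, List.takeWhile_append_dropWhile]
    set tl := rest.dropWhile (fun y => y == x) with htl
    set e : Int := 1 + (rest.count x : Int) with he
    conv_lhs => rw [hdecomp]
    rw [List.foldl_append, run_start (rest.count x) x prev r best ans hb (hprev x (by simp))]
    have htlpw : tl.Pairwise (· ≤ ·) := tail_pairwise h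
    have hprev' : ∀ y ∈ tl, some x ≠ some y := by
      intro y hy e'
      exact absurd ((run_split h).2 y hy) (by simp [Option.some.inj e'])
    rw [ih htlpw (some x) e (max best e) _ (le_trans hb (le_max_left _ _)) hprev']
    -- arithmetic / list algebra
    have hcx : ((x :: rest).count x : Int) = e := by
      rw [List.count_cons_self]; push_cast; omega
    have hmc : mcnt (x :: rest) = max e (mcnt tl) := by
      rw [mcnt_cons h, hcx]
    have ha : 0 ≤ mcnt tl := mcnt_nonneg tl
    have he1 : 1 ≤ e := by omega
    have hfil : (grp tl).filter (fun k => ((tl.count k : Int)) == max (max best e) (mcnt tl)) =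
        (grp tl).filter (fun k => (((x :: rest).count k : Int)) == max best (mcnt (x :: rest))) := by
      apply List.filter_congr
      intro k hk
      rw [count_tail h ((mem_grp htlpw k).mp hk), hmc, max_assoc]
    rw [hfil]
    conv_rhs => rw [grp]
    rw [List.filter_cons]
    by_cases hA : mcnt tl ≤ max best e
    · rw [if_pos hA]
      by_cases h1 : best < e
      · rw [if_pos h1, if_neg (by rw [hmc]; omega), if_pos (by simp only [hcx, hmc, beq_iff_eq]; omega)]
        simp only [List.singleton_append]
        rfl
      · by_cases h2 : e = best
        · rw [if_neg h1, if_pos h2, if_pos (by rw [hmc]; omega),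
              if_pos (by simp only [hcx, hmc, beq_iff_eq]; omega)]
          simp only [List.append_assoc, List.singleton_append]
          rfl
        · rw [if_neg h1, if_neg h2, if_pos (by rw [hmc]; omega),
              if_neg (by simp only [hcx, hmc, beq_iff_eq]; omega)]
    · rw [if_neg hA, if_neg (by rw [hmc]; omega), if_neg (by simp only [hcx, hmc, beq_iff_eq]; omega)]


lemma solve_alt_eq (n : Int) (sList : List String) :
    solve_alt n sList =
      (grp (PySem.List.sorted sList (fun x => x))).filter
        (fun k => ((PySem.List.sorted sList (fun x => x)).count k : Int) == mcnt (PySem.List.sorted sList (fun x => x))) := by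
  unfold solve_alt
  rw [scan_spec _ (PySem.List.sorted_pairwise sList (fun x => x)) none 0 0 [] le_rfl (fun y _ => by simp)]
  rw [ite_self, List.nil_append, max_eq_right (mcnt_nonneg _)]

-- ===== VERDICT (by name: the statement is the Claim_ definition above) =====
theorem solve_spec : Claim_equal_solve := by
  intro n sList _ hpre
  unfold Spec_solve
  -- notation
  set arr := PySem.List.sorted sList (fun x => x) with harr
  have harrpw : arr.Pairwise (· ≤ ·) := PySem.List.sorted_pairwise sList (fun x => x)
  have harrperm : arr.Perm sList := PySem.List.sorted_perm sList (fun x => x) false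
  have hcounts : ∀ k, arr.count k = sList.count k := fun k => harrperm.count_eq k
  have hmemarr : ∀ k, k ∈ arr ↔ k ∈ sList := fun k => PySem.List.mem_sorted sList (fun x => x) false k
  have hitems : (PySem.Dict.counter sList).items
      = (PySem.Set.ofList sList).map (fun k => (k, (sList.count k : Int))) :=
    PySem.Dict.items_counter sList
  -- mc is nonempty
  have hSne : PySem.Set.ofList sList ≠ [] := by
    cases sList with
    | nil => exact absurd rfl hpre
    | cons a l =>
      intro hS
      have : a ∈ PySem.Set.ofList (a :: l) := (PySem.Set.mem_ofList _ _).mpr (by simp)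
      rw [hS] at this
      exact absurd this (by simp)
  have hmcne : PySem.List.sorted (PySem.Dict.counter sList).items (fun kv => kv.2) true ≠ [] := by
    rw [Ne, PySem.List.sorted_eq_nil_iff, hitems, List.map_eq_nil_iff]
    exact hSne
  obtain ⟨p, t, hmc⟩ : ∃ p t, PySem.List.sorted (PySem.Dict.counter sList).items (fun kv => kv.2) true = p :: t := by
    cases hx : PySem.List.sorted (PySem.Dict.counter sList).items (fun kv => kv.2) true with
    | nil => exact absurd hx hmcne
    | cons p t => exact ⟨p, t, rfl⟩
  -- facts about p
  have hp_mem : p ∈ PySem.List.sorted (PySem.Dict.counter sList).items (fun kv => kv.2) true := by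
    rw [hmc]; simp
  have hp_items : p ∈ (PySem.Dict.counter sList).items :=
    (PySem.List.mem_sorted (PySem.Dict.counter sList).items (fun kv => kv.2) true p).mp hp_mem
  obtain ⟨k0, hk0S, hpe⟩ := List.mem_map.mp (hitems ▸ hp_items)
  have hub : ∀ q ∈ (PySem.Dict.counter sList).items, q.2 ≤ p.2 :=
    PySem.List.key_head_sorted_rev_ge (PySem.Dict.counter sList).items (fun kv : String × Int => kv.2) hmc
  -- p.2 is the maximum multiplicity
  have hm : p.2 = mcnt arr := by
    have harrne : arr ≠ [] := by
      rw [harr, Ne, PySem.List.sorted_eq_nil_iff]; exact hpre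
    obtain ⟨k1, hk1g, hk1e⟩ := mcnt_attained harrpw harrne
    have hk1S : k1 ∈ PySem.Set.ofList sList :=
      (PySem.Set.mem_ofList _ _).mpr ((hmemarr k1).mp ((mem_grp harrpw k1).mp hk1g))
    have h1 : mcnt arr ≤ p.2 := by
      have : ((k1, (sList.count k1 : Int)) : String × Int) ∈ (PySem.Dict.counter sList).items := by
        rw [hitems]; exact List.mem_map.mpr ⟨k1, hk1S, rfl⟩
      have := hub _ this
      simpa [hk1e, hcounts k1] using this
    have h2 : p.2 ≤ mcnt arr := by
      have hk0arr : k0 ∈ grp arr :=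
        (mem_grp harrpw k0).mpr ((hmemarr k0).mpr ((PySem.Set.mem_ofList _ _).mp hk0S))
      have := le_mcnt hk0arr
      rw [hcounts k0] at this
      calc p.2 = (sList.count k0 : Int) := by rw [← hpe]
        _ ≤ mcnt arr := this
    omega
  -- evaluate A's body
  show solve n sList = _
  rw [solve]
  simp only [hmc]
  have hget : PySem.List.pyGet? (p :: t) (0 : Int) = some p := by simp [PySem.List.pyGet?, PySem.List.pyIdx?]
  rw [hget]
  dsimp only
  rw [PySem.List.foldl_append_if (fun kv => kv.2 == p.2) (fun kv => kv.1) (p :: t) []]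
  rw [← hmc, List.nil_append]
  -- A's ans is a permutation of B's result
  have hq : ((PySem.List.sorted (PySem.Dict.counter sList).items (fun kv => kv.2) true).filter
      (fun kv => kv.2 == p.2)).Perm ((PySem.Set.ofList sList).map (fun k => (k, (sList.count k : Int))) |>.filter (fun kv => kv.2 == p.2)) := by
    exact List.Perm.filter _ (hitems ▸ PySem.List.sorted_perm _ _ _)
  have hmapfilter : (((PySem.Set.ofList sList).map (fun k => (k, (sList.count k : Int)))).filter
        (fun kv => kv.2 == p.2)).map (fun kv => kv.1)
      = (PySem.Set.ofList sList).filter (fun k => (sList.count k : Int) == p.2) := by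
    rw [List.filter_map, List.map_map]
    simp only [Function.comp_def]
    simp
  rw [solve_alt_eq]
  apply PySem.List.sorted_eq_of_perm_of_pairwise_lt
  · -- the filtered group list is a permutation of A's collected keys
    have h1 : (((PySem.List.sorted (PySem.Dict.counter sList).items (fun kv => kv.2) true).filter
        (fun kv => kv.2 == p.2)).map (fun kv => kv.1)).Perm
        ((PySem.Set.ofList sList).filter (fun k => (sList.count k : Int) == p.2)) := by
      rw [← hmapfilter]
      exact List.Perm.map _ hq
    have h2 : ((grp arr).filter
        (fun k => ((arr.count k : Int)) == mcnt arr)).Perm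
        ((PySem.Set.ofList sList).filter (fun k => (sList.count k : Int) == p.2)) := by
      have hqeq : (grp arr).filter (fun k => ((arr.count k : Int)) == mcnt arr)
          = (grp arr).filter (fun k => (sList.count k : Int) == p.2) := by
        apply List.filter_congr
        intro k _
        rw [hcounts k, ← hm]
      rw [hqeq]
      apply (List.perm_ext_iff_of_nodup ?_ ?_).mpr
      · intro k
        simp only [List.mem_filter]
        rw [mem_grp harrpw k, hmemarr k, ← PySem.Set.mem_ofList sList k]
      · exact List.Nodup.filter _ ((grp_pairwise_lt harrpw).imp ne_of_lt)
      · exact List.Nodup.filter _ (PySem.Set.nodup_ofList sList)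
    exact h2.trans h1.symm
  · exact List.Pairwise.filter _ (grp_pairwise_lt harrpw)
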